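-- pv_equiv track=rewrite | github.com/Perdixky/Latent | src/msp/data/slot_scorer.py | _marker_end_positions
-- ===== SOURCE A (Python) =====
-- def _marker_end_positions(input_ids: list[int], marker_ids: list[int]) -> list[int]:
--     if not marker_ids:
--         return []
--     positions = []
--     marker_len = len(marker_ids)
--     for idx in range(0, len(input_ids) - marker_len + 1):
--         if input_ids[idx : idx + marker_len] == marker_ids:
--             positions.append(idx + marker_len - 1)
--     return positions
-- ===== SOURCE B (Python) =====
-- def _marker_end_positions(input_ids: list[int], marker_ids: list[int]) -> list[int]:
--     m = len(marker_ids)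
--     if m == 0:
--         return []
--     ends = []
--     active = []  # start positions of live partial matches, oldest (longest) first
--     for i, x in enumerate(input_ids):
--         active = [s for s in active + [i] if marker_ids[i - s] == x]
--         if active and active[0] + m == i + 1:
--             ends.append(i)
--             active = active[1:]
--     return ends
-- ===== Notes on version B (the rewrite author's own statement) =====
-- stated objective: alternative
-- what changed: Replaces the slice-per-index scan with a single left-to-right pass that maintains the set of live partial-match start positions (a naive-NFA matcher): each token extends or kills the live candidates and a match is emitted the moment a candidate reaches full length, so no list slicing or re-comparison from scratch is ever done.
import Mathlib
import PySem

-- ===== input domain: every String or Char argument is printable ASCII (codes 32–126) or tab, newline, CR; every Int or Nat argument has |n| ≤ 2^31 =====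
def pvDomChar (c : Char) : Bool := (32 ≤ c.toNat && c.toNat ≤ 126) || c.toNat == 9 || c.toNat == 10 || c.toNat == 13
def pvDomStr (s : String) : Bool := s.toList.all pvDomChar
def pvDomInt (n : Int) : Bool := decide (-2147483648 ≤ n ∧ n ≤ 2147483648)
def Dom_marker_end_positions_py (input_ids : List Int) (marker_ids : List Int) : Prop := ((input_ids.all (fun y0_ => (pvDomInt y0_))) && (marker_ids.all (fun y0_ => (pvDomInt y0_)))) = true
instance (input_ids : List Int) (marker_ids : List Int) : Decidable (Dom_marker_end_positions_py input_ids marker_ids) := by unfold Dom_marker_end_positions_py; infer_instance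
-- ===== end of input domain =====

-- B replaces A's slice-per-index scan by a single pass that maintains the live partial-match
-- start positions and emits an end position the moment a candidate reaches full length
-- (alternative algorithm, same worst-case cost; return values proved equal on all inputs).

-- ===== PORT A =====
def marker_end_positions_py (input_ids : List Int) (marker_ids : List Int) : List Int :=
  if marker_ids = [] then []
  else
    let marker_len : Int := (marker_ids.length : Int)
    (PySem.List.pyRange 0 ((input_ids.length : Int) - marker_len + 1) 1).foldl
      (fun positions idx =>
        if PySem.List.slice input_ids (some idx) (some (idx + marker_len)) = marker_ids
        then positions ++ [idx + marker_len - 1]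
        else positions) []

-- ===== PORT B =====
-- one step of Source B's loop body; state = (active start positions, collected end positions).
-- marker_ids[i - s] is ported as getD (i - s) 0: for every state the loop keeps, i - s is a
-- valid index into marker_ids (Source B indexes the same way), so the default is never used.
def pvStep (marker_ids : List Int) (m : Nat) (st : List Nat × List Int) (xi : Int × Nat) : List Nat × List Int :=
  let i := xi.2
  let active := (st.1 ++ [i]).filter (fun s => marker_ids.getD (i - s) 0 == xi.1)
  match active with
  | [] => ([], st.2)
  | s :: rest => if s + m = i + 1 then (rest, st.2 ++ [(i : Int)]) else (s :: rest, st.2)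

def marker_end_positions_py_alt (input_ids : List Int) (marker_ids : List Int) : List Int :=
  let m := marker_ids.length
  if m = 0 then []
  else (input_ids.zipIdx.foldl (pvStep marker_ids m) ([], [])).2

-- ===== PRECONDITION & SPEC =====
def Spec_marker_end_positions_py (input_ids : List Int) (marker_ids : List Int) (out : List Int) : Prop := out = marker_end_positions_py_alt input_ids marker_ids
instance (input_ids : List Int) (marker_ids : List Int) (out : List Int) : Decidable (Spec_marker_end_positions_py input_ids marker_ids out) := by unfold Spec_marker_end_positions_py; infer_instance

-- ===== CLAIM (what is proved, stated in full; the proofs are below) =====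
def Claim_equal_marker_end_positions_py : Prop := ∀ (input_ids : List Int) (marker_ids : List Int), Dom_marker_end_positions_py input_ids marker_ids → Spec_marker_end_positions_py input_ids marker_ids (marker_end_positions_py input_ids marker_ids)


-- ===== LEMMAS AND PROOFS =====

-- partial match: xs[s:t] = p[:t-s]
def pvC (xs p : List Int) (s t : Nat) : Bool := (xs.take t).drop s == p.take (t - s)

-- invariant value of the active list after t steps
def pvActive (xs p : List Int) (t : Nat) : List Nat :=
  (List.range t).filter (fun s => decide (t - s < p.length) && pvC xs p s t)

def pvEndsPred (xs p : List Int) (i : Nat) : Bool :=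
  decide (p.length ≤ i + 1) && ((xs.drop (i + 1 - p.length)).take p.length == p)

-- invariant value of the ends list after t steps
def pvEnds (xs p : List Int) (t : Nat) : List Int :=
  ((List.range t).filter (pvEndsPred xs p)).map (fun i : Nat => (i : Int))

lemma pv_take_succ (l : List Int) (n : Nat) (h : n < l.length) :
    l.take (n + 1) = l.take n ++ [l[n]] := by
  rw [List.take_add_one, List.getElem?_eq_getElem h]; rfl

lemma pv_append_singleton_inj (l1 l2 : List Int) (a b : Int) :
    (l1 ++ [a] = l2 ++ [b]) ↔ (l1 = l2 ∧ a = b) := by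
  constructor
  · intro h
    simpa using List.append_inj' h rfl
  · rintro ⟨rfl, rfl⟩; rfl

lemma pvC_succ (xs p : List Int) (s t : Nat) (hs : s ≤ t) (ht : t < xs.length)
    (hm : t - s < p.length) :
    pvC xs p s (t + 1) = (pvC xs p s t && (p.getD (t - s) 0 == xs.getD t 0)) := by
  have h1 : xs.take (t + 1) = xs.take t ++ [xs[t]] := pv_take_succ xs t ht
  have h2 : (xs.take t ++ [xs[t]]).drop s = (xs.take t).drop s ++ [xs[t]] :=
    List.drop_append_of_le_length (by simp; omega)
  have h3 : t + 1 - s = (t - s) + 1 := by omega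
  have h4 : p.take ((t - s) + 1) = p.take (t - s) ++ [p[t - s]] := pv_take_succ p (t - s) hm
  simp only [pvC, h1, h2, h3, h4]
  rw [List.getD_eq_getElem p 0 hm, List.getD_eq_getElem xs 0 ht]
  apply Bool.eq_iff_iff.mpr
  simp only [beq_iff_eq, Bool.and_eq_true, pv_append_singleton_inj]
  tauto

lemma pvEnds_succ (xs p : List Int) (t : Nat) :
    pvEnds xs p (t + 1)
      = pvEnds xs p t ++ (if pvEndsPred xs p t then [(t : Int)] else []) := by
  by_cases h : pvEndsPred xs p t <;>
    simp [pvEnds, List.range_succ, List.filter_append, h]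

lemma pv_filter_q_eq (xs p : List Int) (t : Nat) (ht : t < xs.length) :
    ((pvActive xs p t).filter (fun s => p.getD (t - s) 0 == xs.getD t 0))
      = (List.range t).filter (fun s => decide (t + 1 - s ≤ p.length) && pvC xs p s (t + 1)) := by
  unfold pvActive
  rw [List.filter_filter]
  apply List.filter_congr
  intro s hsr
  have hs : s < t := List.mem_range.mp hsr
  by_cases hm : t - s < p.length
  · have h1 : (decide (t - s < p.length)) = true := by simpa using hm
    have h2 : (decide (t + 1 - s ≤ p.length)) = true := by simp; omega
    rw [h1, h2, pvC_succ xs p s t (le_of_lt hs) ht hm]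
    simp only [Bool.true_and]
    exact Bool.and_comm _ _
  · have h1 : (decide (t - s < p.length)) = false := by simpa using hm
    have h2 : (decide (t + 1 - s ≤ p.length)) = false := by simp; omega
    rw [h1, h2]
    simp only [Bool.false_and, Bool.and_false]

lemma pv_single_q_eq (xs p : List Int) (t : Nat) (hp : p ≠ []) (ht : t < xs.length) :
    ([t].filter (fun s => p.getD (t - s) 0 == xs.getD t 0))
      = [t].filter (fun s => decide (t + 1 - s ≤ p.length) && pvC xs p s (t + 1)) := by
  have hm : 0 < p.length := List.length_pos_iff.mpr hp
  simp only [List.filter_singleton]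
  congr 1
  have h1 : t - t = 0 := by omega
  have h2 : (decide (t + 1 - t ≤ p.length)) = true := by simp; omega
  have h3 : (xs.take (t + 1)).drop t = [xs[t]] := by
    rw [pv_take_succ xs t ht, List.drop_append_of_le_length (by simp; omega)]
    simp
  have h4 : p.take (t + 1 - t) = [p[0]] := by
    have : t + 1 - t = 1 := by omega
    rw [this]
    rw [pv_take_succ p 0 hm]
    simp
  simp only [pvC, h1, h2, h3, h4, Bool.true_and]
  rw [List.getD_eq_getElem p 0 hm, List.getD_eq_getElem xs 0 ht]
  simp [eq_comm]

-- the filtered candidate list after consuming token t, with the full-length bound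
def pvFull (xs p : List Int) (t : Nat) : List Nat :=
  (List.range (t + 1)).filter (fun s => decide (t + 1 - s ≤ p.length) && pvC xs p s (t + 1))

lemma pv_new_active_eq (xs p : List Int) (t : Nat) (hp : p ≠ []) (ht : t < xs.length) :
    ((pvActive xs p t ++ [t]).filter (fun s => p.getD (t - s) 0 == xs.getD t 0))
      = pvFull xs p t := by
  rw [List.filter_append, pv_filter_q_eq xs p t ht, pv_single_q_eq xs p t hp ht]
  unfold pvFull
  rw [List.range_succ, List.filter_append]

lemma pvC_full (xs p : List Int) (t : Nat) (hm : p.length ≤ t + 1) :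
    pvC xs p (t + 1 - p.length) (t + 1) = ((xs.drop (t + 1 - p.length)).take p.length == p) := by
  unfold pvC
  rw [List.drop_take]
  have h1 : t + 1 - (t + 1 - p.length) = p.length := by omega
  rw [h1, List.take_length]

lemma pvFull_split (xs p : List Int) (t : Nat) (hp : p ≠ []) (hm : p.length ≤ t + 1) :
    pvFull xs p t
      = (if (xs.drop (t + 1 - p.length)).take p.length == p then [t + 1 - p.length] else [])
        ++ pvActive xs p (t + 1) := by
  have hm1 : 0 < p.length := List.length_pos_iff.mpr hp
  have hsplit : t + 1 = ((t + 1 - p.length) + 1) + (p.length - 1) := by omega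
  have hrange : List.range (t + 1)
      = (List.range (t + 1 - p.length) ++ [t + 1 - p.length])
        ++ (List.range (p.length - 1)).map (((t + 1 - p.length) + 1) + ·) := by
    conv_lhs => rw [hsplit]
    rw [List.range_add, List.range_succ]
  unfold pvFull pvActive
  rw [hrange, List.filter_append, List.filter_append, List.filter_append, List.filter_append]
  have hlow_full : (List.range (t + 1 - p.length)).filter
      (fun s => decide (t + 1 - s ≤ p.length) && pvC xs p s (t + 1)) = [] := by
    rw [List.filter_eq_nil_iff]
    intro s hsr
    have hss : s < t + 1 - p.length := List.mem_range.mp hsr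
    simp only [Bool.and_eq_true, decide_eq_true_eq, not_and]
    intro h
    omega
  have hlow_strict : (List.range (t + 1 - p.length)).filter
      (fun s => decide (t + 1 - s < p.length) && pvC xs p s (t + 1)) = [] := by
    rw [List.filter_eq_nil_iff]
    intro s hsr
    have hss : s < t + 1 - p.length := List.mem_range.mp hsr
    simp only [Bool.and_eq_true, decide_eq_true_eq, not_and]
    intro h
    omega
  have hmid_full : ([t + 1 - p.length].filter
        (fun s => decide (t + 1 - s ≤ p.length) && pvC xs p s (t + 1)))
      = (if (xs.drop (t + 1 - p.length)).take p.length == p then [t + 1 - p.length] else []) := by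
    rw [List.filter_singleton]
    have h1 : (decide (t + 1 - (t + 1 - p.length) ≤ p.length)) = true := by simp; omega
    rw [h1, Bool.true_and, pvC_full xs p t hm]
    cases hc : ((xs.drop (t + 1 - p.length)).take p.length == p) <;> simp
  have hmid_strict : ([t + 1 - p.length].filter
        (fun s => decide (t + 1 - s < p.length) && pvC xs p s (t + 1))) = [] := by
    rw [List.filter_singleton]
    have h1 : (decide (t + 1 - (t + 1 - p.length) < p.length)) = false := by simp; omega
    simp [h1]
  have hhigh : ((List.range (p.length - 1)).map (((t + 1 - p.length) + 1) + ·)).filter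
        (fun s => decide (t + 1 - s ≤ p.length) && pvC xs p s (t + 1))
      = ((List.range (p.length - 1)).map (((t + 1 - p.length) + 1) + ·)).filter
        (fun s => decide (t + 1 - s < p.length) && pvC xs p s (t + 1)) := by
    apply List.filter_congr
    intro s hsr
    obtain ⟨j, hj, rfl⟩ := List.mem_map.mp hsr
    have hj' : j < p.length - 1 := List.mem_range.mp hj
    have h1 : (decide (t + 1 - ((t + 1 - p.length) + 1 + j) ≤ p.length)) = true := by simp; omega
    have h2 : (decide (t + 1 - ((t + 1 - p.length) + 1 + j) < p.length)) = true := by simp; omega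
    rw [h1, h2]
  rw [hlow_full, hlow_strict, hmid_full, hmid_strict, hhigh]
  simp

lemma pvFull_small (xs p : List Int) (t : Nat) (hmt : t + 1 < p.length) :
    pvFull xs p t = pvActive xs p (t + 1) := by
  unfold pvFull pvActive
  apply List.filter_congr
  intro s hsr
  have hs : s < t + 1 := List.mem_range.mp hsr
  have h1 : (decide (t + 1 - s ≤ p.length)) = true := by simp; omega
  have h2 : (decide (t + 1 - s < p.length)) = true := by simp; omega
  rw [h1, h2]

lemma pvActive_mem_ge (xs p : List Int) (t : Nat) (s : Nat)
    (h : s ∈ pvActive xs p (t + 1)) : t + 1 - s < p.length := by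
  unfold pvActive at h
  have := List.of_mem_filter h
  simp only [Bool.and_eq_true, decide_eq_true_eq] at this
  exact this.1

lemma pv_step_lemma (xs p : List Int) (hp : p ≠ []) (t : Nat) (ht : t < xs.length) :
    pvStep p p.length (pvActive xs p t, pvEnds xs p t) (xs.getD t 0, t)
      = (pvActive xs p (t + 1), pvEnds xs p (t + 1)) := by
  have hm1 : 0 < p.length := List.length_pos_iff.mpr hp
  unfold pvStep
  simp only
  rw [pv_new_active_eq xs p t hp ht]
  rw [pvEnds_succ xs p t]
  by_cases hm : p.length ≤ t + 1
  · rw [pvFull_split xs p t hp hm]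
    by_cases hocc : ((xs.drop (t + 1 - p.length)).take p.length == p) = true
    · rw [if_pos hocc]
      have hpred : pvEndsPred xs p t = true := by
        unfold pvEndsPred
        rw [hocc]
        simp; omega
      rw [hpred]
      simp only [List.cons_append, List.nil_append]
      have harith : t + 1 - p.length + p.length = t + 1 := by omega
      rw [if_pos harith]
      simp
    · rw [if_neg hocc]
      have hpred : pvEndsPred xs p t = false := by
        unfold pvEndsPred
        simp only [Bool.and_eq_false_iff]
        right
        simpa using hocc
      rw [hpred]
      simp only [List.nil_append]
      cases hA : pvActive xs p (t + 1) with
      | nil => simp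
      | cons s rest =>
        have hsmem : s ∈ pvActive xs p (t + 1) := by rw [hA]; exact List.mem_cons_self
        have := pvActive_mem_ge xs p t s hsmem
        have hne : ¬ (s + p.length = t + 1) := by omega
        simp [hne]
  · rw [pvFull_small xs p t (by omega)]
    have hpred : pvEndsPred xs p t = false := by
      unfold pvEndsPred
      simp only [Bool.and_eq_false_iff]
      left
      simp; omega
    rw [hpred]
    cases hA : pvActive xs p (t + 1) with
    | nil => simp
    | cons s rest =>
      have hne : ¬ (s + p.length = t + 1) := by omega
      simp [hne]

lemma pv_fold_lemma (xs p : List Int) (hp : p ≠ []) (t : Nat) (ht : t ≤ xs.length) :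
    (xs.zipIdx.take t).foldl (pvStep p p.length) ([], [])
      = (pvActive xs p t, pvEnds xs p t) := by
  induction t with
  | zero => simp [pvActive, pvEnds]
  | succ k ih =>
    have hk : k < xs.length := by omega
    have h1 : xs.zipIdx.take (k + 1) = xs.zipIdx.take k ++ [(xs.getD k 0, k)] := by
      have : xs.zipIdx[k]? = some (xs[k], k) := by
        simp [List.getElem?_zipIdx, List.getElem?_eq_getElem hk]
      rw [List.take_add_one, this]
      simp [List.getD, List.getElem?_eq_getElem hk]
    rw [h1, List.foldl_append, ih (by omega)]
    simpa using pv_step_lemma xs p hp k hk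

lemma pv_B_eq (xs p : List Int) (hp : p ≠ []) :
    marker_end_positions_py_alt xs p = pvEnds xs p xs.length := by
  have hm : p.length ≠ 0 := by simpa using hp
  have h := pv_fold_lemma xs p hp xs.length le_rfl
  rw [List.take_of_length_le (by simp)] at h
  simp only [marker_end_positions_py_alt, if_neg hm, h]

lemma pv_A_eq (xs p : List Int) (hp : p ≠ []) :
    marker_end_positions_py xs p
      = ((List.range (xs.length + 1 - p.length)).filter
            (fun s => (xs.drop s).take p.length == p)).map
          (fun s : Nat => (s : Int) + (p.length : Int) - 1) := by
  unfold marker_end_positions_py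
  rw [if_neg hp]
  simp only [PySem.List.pyRange_one, List.foldl_map]
  rw [show (((xs.length : Int) - (p.length : Int) + 1) - 0).toNat
        = xs.length + 1 - p.length by omega]
  rw [PySem.List.foldl_congr_mem' _ _
      (fun acc k => if ((xs.drop k).take p.length == p) = true
        then acc ++ [(k : Int) + (p.length : Int) - 1] else acc) _ ?_]
  · rw [PySem.List.foldl_append_if (fun k => (xs.drop k).take p.length == p)
        (fun k => (k : Int) + (p.length : Int) - 1)]
    simp
  · intro k hk acc
    simp only [zero_add, PySem.List.slice_natCast_add]
    by_cases hc : (xs.drop k).take p.length = p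
    · simp [hc]
    · simp [hc]

lemma pv_ends_eq (xs p : List Int) (hp : p ≠ []) :
    pvEnds xs p xs.length
      = ((List.range (xs.length + 1 - p.length)).filter
            (fun s => (xs.drop s).take p.length == p)).map
          (fun s : Nat => (s : Int) + (p.length : Int) - 1) := by
  have hm1 : 0 < p.length := List.length_pos_iff.mpr hp
  by_cases hn : p.length - 1 ≤ xs.length
  · have hsplit : xs.length = (p.length - 1) + (xs.length + 1 - p.length) := by omega
    unfold pvEnds
    conv_lhs => rw [hsplit]
    rw [List.range_add, List.filter_append]
    have hlow : (List.range (p.length - 1)).filter (pvEndsPred xs p) = [] := by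
      rw [List.filter_eq_nil_iff]
      intro i hir
      have hi : i < p.length - 1 := List.mem_range.mp hir
      unfold pvEndsPred
      simp only [Bool.and_eq_true, decide_eq_true_eq, not_and]
      intro h
      omega
    rw [hlow, List.nil_append]
    rw [List.filter_map]
    have hfc : (List.range (xs.length + 1 - p.length)).filter
          (pvEndsPred xs p ∘ ((p.length - 1) + ·))
        = (List.range (xs.length + 1 - p.length)).filter
          (fun s => (xs.drop s).take p.length == p) := by
      apply List.filter_congr
      intro s hsr
      simp only [Function.comp_apply]
      unfold pvEndsPred
      have h1 : (decide (p.length ≤ p.length - 1 + s + 1)) = true := by simp; omega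
      have h2 : p.length - 1 + s + 1 - p.length = s := by omega
      rw [h1, h2, Bool.true_and]
    rw [hfc, List.map_map]
    apply List.map_congr_left
    intro s hsr
    simp only [Function.comp_apply]
    push_cast [Nat.one_le_iff_ne_zero.mp hm1]
    omega
  · have hz : xs.length + 1 - p.length = 0 := by omega
    rw [hz]
    unfold pvEnds
    have hlow : (List.range xs.length).filter (pvEndsPred xs p) = [] := by
      rw [List.filter_eq_nil_iff]
      intro i hir
      have hi : i < xs.length := List.mem_range.mp hir
      unfold pvEndsPred
      simp only [Bool.and_eq_true, decide_eq_true_eq, not_and]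
      intro h
      omega
    rw [hlow]
    simp

-- ===== VERDICT (by name: the statement is the Claim_ definition above) =====
theorem marker_end_positions_py_spec : Claim_equal_marker_end_positions_py := by
  intro xs p _
  unfold Spec_marker_end_positions_py
  by_cases hp : p = []
  · subst hp; rfl
  · rw [pv_A_eq xs p hp, pv_B_eq xs p hp, pv_ends_eq xs p hp]
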